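-- pv_equiv track=rewrite | github.com/miguelrego25/PycharmProjects | Laboratórios de Algoritmia II 2021-2022/Treino1/Apelidos/main.py | apelidos
-- ===== SOURCE A (Python) =====
-- def apelidos(nomes):
--     dic={}
--     finallist=[]
--
--     for x in nomes:
--         dic[x] = len(list(x.split()))
--
--     pil1 = sorted(dic.items())
--     pil  = sorted(pil1,key=lambda x: x[1], reverse=False )
--
--     for i in pil:
--         finallist.append(i[0])
--     return finallist
-- ===== SOURCE B (Python) =====
-- def apelidos(nomes):
--     # Group distinct names by word count, then emit buckets in ascending
--     # word-count order, each bucket alphabetically.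
--     buckets = {}
--     for x in nomes:
--         buckets.setdefault(len(x.split()), set()).add(x)
--     finallist = []
--     for c in sorted(buckets):
--         finallist.extend(sorted(buckets[c]))
--     return finallist
-- ===== Notes on version B (the rewrite author's own statement) =====
-- stated objective: alternative
-- what changed: Replaces A's name->wordcount dict followed by two global stable sorts with a grouping dict from word count to the set of distinct names, emitting buckets in ascending count order with each bucket sorted alphabetically.
import Mathlib
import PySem

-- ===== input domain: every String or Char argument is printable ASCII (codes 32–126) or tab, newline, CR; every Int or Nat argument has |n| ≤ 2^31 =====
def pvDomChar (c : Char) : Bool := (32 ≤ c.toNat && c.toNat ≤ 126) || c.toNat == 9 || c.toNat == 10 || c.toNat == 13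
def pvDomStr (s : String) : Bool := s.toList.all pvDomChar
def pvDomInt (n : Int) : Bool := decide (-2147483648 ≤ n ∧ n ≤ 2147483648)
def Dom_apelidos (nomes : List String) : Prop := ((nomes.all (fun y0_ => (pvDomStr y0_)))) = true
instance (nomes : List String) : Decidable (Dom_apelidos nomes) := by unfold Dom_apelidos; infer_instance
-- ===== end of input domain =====

-- B groups the distinct names by word count and emits buckets in ascending count
-- order, each sorted alphabetically, instead of A's two global stable sorts
-- (objective: alternative decomposition, same exact output).

-- word count of a name: len(x.split()), shared by both Pythons verbatim
def pvWc (x : String) : Int := ((PySem.Str.split₀ x).length : Int)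

-- ===== PORT A =====
def apelidos (nomes : List String) : List String :=
  let dic := nomes.foldl (fun d x => d.insert x (pvWc x))
    (PySem.Dict.empty : PySem.Dict String Int)
  let pil1 := PySem.List.sorted2 dic.items (fun p => p.1) (fun p => p.2) false
  let pil := PySem.List.sorted pil1 (fun p => p.2) false
  pil.foldl (fun acc i => acc ++ [i.1]) []

-- ===== PORT B =====
def apelidos_alt (nomes : List String) : List String :=
  let buckets := nomes.foldl
    (fun d x => d.modify (pvWc x) (PySem.Set.ofList []) (fun s => PySem.Set.add s x))
    (PySem.Dict.empty : PySem.Dict Int (PySem.Set String))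
  (PySem.List.sorted buckets.keys (fun c => c) false).foldl
    (fun acc c =>
      acc ++ PySem.List.sorted (buckets.getD c (PySem.Set.ofList [])) (fun s => s) false) []

-- ===== PRECONDITION & SPEC =====
def Spec_apelidos (nomes : List String) (out : List String) : Prop := out = apelidos_alt nomes
instance (nomes : List String) (out : List String) : Decidable (Spec_apelidos nomes out) := by unfold Spec_apelidos; infer_instance

-- ===== CLAIM (what is proved, stated in full; the proofs are below) =====
def Claim_equal_apelidos : Prop := ∀ (nomes : List String), Dom_apelidos nomes → Spec_apelidos nomes (apelidos nomes)

-- ===== LEMMAS AND PROOFS =====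

-- the order in which both programs emit names: by word count, ties alphabetical
def pvLexS (a b : String) : Prop := pvWc a < pvWc b ∨ (pvWc a = pvWc b ∧ a < b)
-- the same order on A's (name, count) pairs, read off the pair components
def pvLexP (p q : String × Int) : Prop := p.2 < q.2 ∨ (p.2 = q.2 ∧ p.1 < q.1)

lemma pvLexS_irrefl (a : String) : ¬ pvLexS a a := by
  rintro (h | ⟨_, h⟩)
  · exact lt_irrefl _ h
  · exact lt_irrefl _ h

lemma pvLexS_antisymm (a b : String) : pvLexS a b → pvLexS b a → a = b := by
  rintro (h1 | ⟨h1, h1'⟩) (h2 | ⟨h2, h2'⟩)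
  · exact absurd h2 (lt_asymm h1)
  · exact absurd h1 (by omega)
  · exact absurd h2 (by omega)
  · exact absurd h2' (lt_asymm h1')

lemma pvLexS_nodup {l : List String} (h : l.Pairwise pvLexS) : l.Nodup :=
  List.Pairwise.imp (fun h' => by rintro rfl; exact pvLexS_irrefl _ h') h

lemma pvInsertBy_nil {α : Type} (before : α → α → Bool) (x : α) :
    PySem.List.insertBy before x [] = [x] := by
  simp [PySem.List.insertBy]

lemma pvInsertBy_cons {α : Type} (before : α → α → Bool) (x y : α) (t : List α) :
    PySem.List.insertBy before x (y :: t)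
      = if before x y then x :: y :: t else y :: PySem.List.insertBy before x t := by
  simp [PySem.List.insertBy]

-- one insertion-sort step keeps the accumulator R-sorted (R refines `before`
-- via the side relation P that the new element bears to everything inserted so far)
lemma pvInsertBy_pairwise {α : Type} (before : α → α → Bool) (R P : α → α → Prop)
    (hRt : ∀ a b c, R a b → R b c → R a c)
    (hbt : ∀ a b, before a b = true → P b a → R a b)
    (hbf : ∀ a b, before a b = false → P b a → R b a) :
    ∀ (acc : List α) (x : α), acc.Pairwise R → (∀ a ∈ acc, P a x) →
      (PySem.List.insertBy before x acc).Pairwise R := by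
  intro acc
  induction acc with
  | nil =>
    intro x _ _
    rw [pvInsertBy_nil]
    exact List.pairwise_singleton _ _
  | cons y t ih =>
    intro x hp hP
    rw [List.pairwise_cons] at hp
    obtain ⟨hy, ht⟩ := hp
    rw [pvInsertBy_cons]
    by_cases hb : before x y = true
    · rw [if_pos hb]
      refine List.Pairwise.cons ?_ (List.Pairwise.cons hy ht)
      intro a ha
      rcases List.mem_cons.mp ha with rfl | hat
      · exact hbt _ _ hb (hP _ (List.mem_cons_self ..))
      · exact hRt _ _ _ (hbt _ _ hb (hP _ (List.mem_cons_self ..))) (hy a hat)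
    · have hb' : before x y = false := by
        cases hbv : before x y
        · rfl
        · exact absurd hbv hb
      rw [if_neg hb]
      refine List.Pairwise.cons ?_ (ih x ht (fun a ha => hP a (List.mem_cons_of_mem _ ha)))
      intro a ha
      rcases (PySem.List.mem_insertBy _ _ _ _).mp ha with rfl | hat
      · exact hbf _ _ hb' (hP _ (List.mem_cons_self ..))
      · exact hy a hat

-- the whole insertion-sort fold is R-sorted when the input is P-sorted
lemma pvFoldl_insertBy_pairwise {α : Type} (before : α → α → Bool) (R P : α → α → Prop)
    (hRt : ∀ a b c, R a b → R b c → R a c)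
    (hbt : ∀ a b, before a b = true → P b a → R a b)
    (hbf : ∀ a b, before a b = false → P b a → R b a) :
    ∀ (xs acc : List α), acc.Pairwise R → xs.Pairwise P →
      (∀ a ∈ acc, ∀ x ∈ xs, P a x) →
      (xs.foldl (fun acc x => PySem.List.insertBy before x acc) acc).Pairwise R := by
  intro xs
  induction xs with
  | nil => intro acc h _ _; simpa using h
  | cons x t ih =>
    intro acc hacc hxs hcross
    rw [List.pairwise_cons] at hxs
    rw [List.foldl_cons]
    refine ih _ (pvInsertBy_pairwise before R P hRt hbt hbf acc x hacc
      (fun a ha => hcross a ha x (List.mem_cons_self ..))) hxs.2 ?_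
    intro a ha z hz
    rcases (PySem.List.mem_insertBy _ _ _ _).mp ha with rfl | h
    · exact hxs.1 z hz
    · exact hcross a h z (List.mem_cons_of_mem _ hz)

-- ----- A side -----

def pvDicA (nomes : List String) : PySem.Dict String Int :=
  nomes.foldl (fun d x => d.insert x (pvWc x)) (PySem.Dict.empty : PySem.Dict String Int)

def pvPil1 (nomes : List String) : List (String × Int) :=
  PySem.List.sorted2 (pvDicA nomes).items (fun p => p.1) (fun p => p.2) false

def pvPil (nomes : List String) : List (String × Int) :=
  PySem.List.sorted (pvPil1 nomes) (fun p => p.2) false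

lemma pvApelidos_eq (nomes : List String) :
    apelidos nomes = (pvPil nomes).map (fun p => p.1) := by
  simp only [apelidos, pvPil, pvPil1, pvDicA]
  rw [PySem.List.foldl_append_singleton_eq_map]
  simp

lemma pvItemsA_snd (nomes : List String) :
    ∀ p ∈ (pvDicA nomes).items, p.2 = pvWc p.1 := by
  have aux : ∀ (l : List String) (d : PySem.Dict String Int),
      (∀ p ∈ d.items, p.2 = pvWc p.1) →
      ∀ p ∈ (l.foldl (fun d x => d.insert x (pvWc x)) d).items, p.2 = pvWc p.1 := by
    intro l
    induction l with
    | nil => intro d hd; simpa using hd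
    | cons x t ih =>
      intro d hd
      rw [List.foldl_cons]
      refine ih _ ?_
      intro p hp
      rcases (PySem.Dict.mem_items_insert _ _ _ _).mp hp with rfl | ⟨hpd, _⟩
      · rfl
      · exact hd p hpd
  exact aux nomes PySem.Dict.empty (by simp [PySem.Dict.empty])

lemma pvKeysA (nomes : List String) :
    (pvDicA nomes).keys = PySem.Set.ofList nomes := by
  unfold pvDicA
  rw [PySem.Dict.keys_foldl_insert]
  rw [PySem.Dict.keys_empty, PySem.Set.update_nil_left]

lemma pvItemsA_ne (nomes : List String) :
    (pvDicA nomes).items.Pairwise (fun p q => p.1 ≠ q.1) := by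
  have h1 : ((pvDicA nomes).keys).Nodup := by
    rw [pvKeysA]; exact PySem.Set.nodup_ofList nomes
  have h2 : List.Pairwise (fun a b => a ≠ b) ((pvDicA nomes).items.map (fun p => p.1)) := h1
  exact List.pairwise_map.mp h2

lemma pvPil1_pairwise (nomes : List String) :
    (pvPil1 nomes).Pairwise (fun p q => p.1 < q.1) := by
  have heq : pvPil1 nomes
      = (pvDicA nomes).items.foldl (fun acc x => PySem.List.insertBy
          (fun a b => decide (a.1 < b.1) || (!decide (b.1 < a.1) && decide (a.2 < b.2))) x acc) [] := rfl
  rw [heq]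
  refine pvFoldl_insertBy_pairwise
      (fun (a b : String × Int) => decide (a.1 < b.1) || (!decide (b.1 < a.1) && decide (a.2 < b.2)))
      (fun (p q : String × Int) => p.1 < q.1) (fun (p q : String × Int) => p.1 ≠ q.1)
      (fun a b c h1 h2 => lt_trans h1 h2) ?_ ?_ _ [] List.Pairwise.nil (pvItemsA_ne nomes) (by simp)
  · intro a b hb hP
    have hb' : a.1 < b.1 ∨ (¬ b.1 < a.1 ∧ a.2 < b.2) := by simpa using hb
    rcases hb' with h | ⟨h1, _⟩
    · exact h
    · exact lt_of_le_of_ne (not_lt.mp h1) (Ne.symm hP)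
  · intro a b hb hP
    have h1 : ¬ a.1 < b.1 := by intro h; simp [h] at hb
    exact lt_of_le_of_ne (not_lt.mp h1) hP

lemma pvPil_pairwise (nomes : List String) : (pvPil nomes).Pairwise pvLexP := by
  unfold pvPil
  rw [PySem.List.sorted_eq_foldl_insertBy]
  refine pvFoldl_insertBy_pairwise _ pvLexP (fun p q => p.1 < q.1)
    ?_ ?_ ?_ _ [] List.Pairwise.nil (pvPil1_pairwise nomes) (by simp)
  · rintro a b c (h1 | ⟨h1, h1'⟩) (h2 | ⟨h2, h2'⟩)
    · left; omega
    · left; omega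
    · left; omega
    · right; exact ⟨by omega, lt_trans h1' h2'⟩
  · intro a b hb _
    exact Or.inl (of_decide_eq_true hb)
  · intro a b hb hP
    have hle : b.2 ≤ a.2 := not_lt.mp (of_decide_eq_false hb)
    rcases lt_or_eq_of_le hle with h | h
    · exact Or.inl h
    · exact Or.inr ⟨h, hP⟩

lemma pvMemPil_snd (nomes : List String) :
    ∀ p ∈ pvPil nomes, p.2 = pvWc p.1 := by
  intro p hp
  have h1 : p ∈ pvPil1 nomes := (PySem.List.mem_sorted _ _ _ _).mp hp
  have h2 : p ∈ (pvDicA nomes).items :=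
    (PySem.List.sorted2_perm _ _ _ _).mem_iff.mp h1
  exact pvItemsA_snd nomes p h2

lemma pvA_pairwise (nomes : List String) : (apelidos nomes).Pairwise pvLexS := by
  rw [pvApelidos_eq, List.pairwise_map]
  refine List.Pairwise.imp_of_mem ?_ (pvPil_pairwise nomes)
  intro a b ha hb h
  have ha2 := pvMemPil_snd nomes a ha
  have hb2 := pvMemPil_snd nomes b hb
  unfold pvLexP at h
  unfold pvLexS
  rw [ha2, hb2] at h
  exact h

lemma pvA_mem (nomes : List String) :
    ∀ x, x ∈ apelidos nomes ↔ x ∈ nomes := by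
  intro x
  rw [pvApelidos_eq]
  have hperm : (pvPil nomes).Perm (pvDicA nomes).items :=
    (PySem.List.sorted_perm _ _ _).trans (PySem.List.sorted2_perm _ _ _ _)
  have hmap : ((pvPil nomes).map (fun p => p.1)).Perm ((pvDicA nomes).items.map (fun p => p.1)) :=
    hperm.map _
  rw [hmap.mem_iff]
  have hkeys : (pvDicA nomes).items.map (fun p => p.1) = PySem.Set.ofList nomes :=
    pvKeysA nomes
  rw [hkeys, PySem.Set.mem_ofList]

-- ----- B side -----

def pvBuckets (nomes : List String) : PySem.Dict Int (PySem.Set String) :=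
  nomes.foldl
    (fun d x => d.modify (pvWc x) (PySem.Set.ofList []) (fun s => PySem.Set.add s x))
    (PySem.Dict.empty : PySem.Dict Int (PySem.Set String))

lemma pvApelidosAlt_eq (nomes : List String) :
    apelidos_alt nomes
      = (PySem.List.sorted (pvBuckets nomes).keys (fun c => c) false).flatMap
          (fun c => PySem.List.sorted ((pvBuckets nomes).getD c (PySem.Set.ofList []))
            (fun s => s) false) := by
  simp only [apelidos_alt, pvBuckets]
  rw [PySem.List.foldl_append_eq_flatMap]
  simp

lemma pvKeysB (nomes : List String) :
    (pvBuckets nomes).keys = PySem.Set.ofList (nomes.map pvWc) := by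
  unfold pvBuckets
  rw [PySem.Dict.keys_foldl_modify_key]
  rw [PySem.Dict.keys_empty, PySem.Set.update_nil_left]

lemma pvGetDB (nomes : List String) (c : Int) :
    (pvBuckets nomes).getD c (PySem.Set.ofList [])
      = PySem.Set.ofList (nomes.filter (fun x => pvWc x == c)) := by
  have aux : ∀ (l : List String) (d : PySem.Dict Int (PySem.Set String)) (c : Int),
      (l.foldl (fun d x => d.modify (pvWc x) (PySem.Set.ofList []) (fun s => PySem.Set.add s x)) d).getD c (PySem.Set.ofList [])
      = (l.filter (fun x => pvWc x == c)).foldl PySem.Set.add (d.getD c (PySem.Set.ofList [])) := by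
    intro l
    induction l with
    | nil => intro d c; simp
    | cons x t ih =>
      intro d c
      rw [List.foldl_cons, List.filter_cons]
      by_cases h : pvWc x = c
      · subst h
        rw [if_pos (by simp)]
        rw [ih, PySem.Dict.getD_modify_self]
        rfl
      · rw [if_neg (by simpa using h)]
        rw [ih, PySem.Dict.getD_modify_of_ne _ _ _ (fun e => h e.symm)]
  unfold pvBuckets
  rw [aux, PySem.Dict.getD_empty, PySem.Set.ofList_nil, ← PySem.Set.ofList_eq_foldl]

lemma pvMemBucket (nomes : List String) (c : Int) (x : String) :
    x ∈ PySem.List.sorted ((pvBuckets nomes).getD c (PySem.Set.ofList [])) (fun s => s) false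
      ↔ x ∈ nomes ∧ pvWc x = c := by
  rw [PySem.List.mem_sorted, pvGetDB, PySem.Set.mem_ofList, List.mem_filter]
  simp

lemma pvB_pairwise (nomes : List String) : (apelidos_alt nomes).Pairwise pvLexS := by
  rw [pvApelidosAlt_eq]
  have hflat : ∀ (l : List Int),
      (∀ c ∈ l, (PySem.List.sorted ((pvBuckets nomes).getD c (PySem.Set.ofList [])) (fun s => s) false).Pairwise pvLexS) →
      l.Pairwise (fun a b => ∀ x ∈ PySem.List.sorted ((pvBuckets nomes).getD a (PySem.Set.ofList [])) (fun s => s) false,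
        ∀ y ∈ PySem.List.sorted ((pvBuckets nomes).getD b (PySem.Set.ofList [])) (fun s => s) false, pvLexS x y) →
      (l.flatMap (fun c => PySem.List.sorted ((pvBuckets nomes).getD c (PySem.Set.ofList [])) (fun s => s) false)).Pairwise pvLexS := by
    intro l
    induction l with
    | nil => intro _ _; simp
    | cons a t ih =>
      intro h1 h2
      rw [List.pairwise_cons] at h2
      rw [List.flatMap_cons, List.pairwise_append]
      refine ⟨h1 a (List.mem_cons_self ..), ih (fun c hc => h1 c (List.mem_cons_of_mem _ hc)) h2.2, ?_⟩
      intro x hx y hy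
      obtain ⟨b, hb, hyb⟩ := List.mem_flatMap.mp hy
      exact h2.1 b hb x hx y hyb
  refine hflat _ ?_ ?_
  · intro c _
    have hp : (PySem.List.sorted ((pvBuckets nomes).getD c (PySem.Set.ofList [])) (fun s => s) false).Pairwise (fun a b => a < b) := by
      rw [pvGetDB]
      exact PySem.List.sorted_ofList_pairwise_lt _
    refine List.Pairwise.imp_of_mem ?_ hp
    intro a b ha hb hlt
    have ha' := (pvMemBucket nomes c a).mp ha
    have hb' := (pvMemBucket nomes c b).mp hb
    exact Or.inr ⟨by rw [ha'.2, hb'.2], hlt⟩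
  · have houter : (PySem.List.sorted (pvBuckets nomes).keys (fun c => c) false).Pairwise (fun a b => a < b) := by
      rw [pvKeysB]
      exact PySem.List.sorted_ofList_pairwise_lt _
    refine List.Pairwise.imp ?_ houter
    intro a b hlt x hx y hy
    have hx' := (pvMemBucket nomes a x).mp hx
    have hy' := (pvMemBucket nomes b y).mp hy
    exact Or.inl (by rw [hx'.2, hy'.2]; exact hlt)

lemma pvB_mem (nomes : List String) :
    ∀ x, x ∈ apelidos_alt nomes ↔ x ∈ nomes := by
  intro x
  rw [pvApelidosAlt_eq]
  rw [List.mem_flatMap]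
  constructor
  · rintro ⟨c, _, hx⟩
    exact ((pvMemBucket nomes c x).mp hx).1
  · intro hx
    refine ⟨pvWc x, ?_, (pvMemBucket nomes (pvWc x) x).mpr ⟨hx, rfl⟩⟩
    rw [PySem.List.mem_sorted, pvKeysB, PySem.Set.mem_ofList]
    exact List.mem_map.mpr ⟨x, hx, rfl⟩

-- ----- putting the two together -----

lemma pv_main (nomes : List String) : apelidos nomes = apelidos_alt nomes := by
  refine List.Perm.eq_of_pairwise
    (fun a b _ _ hab hba => pvLexS_antisymm a b hab hba)
    (pvA_pairwise nomes) (pvB_pairwise nomes) ?_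
  rw [List.perm_ext_iff_of_nodup (pvLexS_nodup (pvA_pairwise nomes)) (pvLexS_nodup (pvB_pairwise nomes))]
  intro a
  rw [pvA_mem nomes a, pvB_mem nomes a]

-- ===== VERDICT (by name: the statement is the Claim_ definition above) =====
theorem apelidos_spec : Claim_equal_apelidos := by
  intro nomes _
  unfold Spec_apelidos
  exact pv_main nomes
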